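-- pv_equiv track=rewrite | github.com/xLucyu/NK-Girl | utils/helperFunctions/processCollectionEvent.py | getSeedLong
-- ===== SOURCE A (Python) =====
-- TWO64 = 1 << 64
--
-- TWO63 = 1 << 63
--
-- def toLong(num: int) -> int:
--
--     v = num & (TWO64 - 1)
--     if v >= TWO63:
--         v -= TWO64
--     return v
--
-- def longAbs(num: int) -> int:
--
--     if num == -TWO63:
--         return num
--     return -num if num < 0 else num
--
-- def I64(string: str) -> int:
--
--     result = 0
--     for char in string:
--         digit = ord(char) - 48
--         result = toLong(toLong(result * 10) + digit)
--     return result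
--
-- def getSeedLong(eventID: str) -> int:
--
--     subString = ""
--     for char in eventID:
--         subString += str(ord(char))
--
--     if len(subString) > 18:
--         subString = subString[:18]
--
--     parsed = I64(subString)
--     return longAbs(parsed)
-- ===== SOURCE B (Python) =====
-- def getSeedLong(eventID: str) -> int:
--     result = 0
--     count = 0
--     for char in eventID:
--         for d in str(ord(char)):
--             result = result * 10 + (ord(d) - 48)
--             count += 1
--             if count == 18:
--                 return result
--     return result
-- ===== Notes on version B (the rewrite author's own statement) =====
-- stated objective: faster
-- what changed: B replaces A's three passes (build the full concatenated ord-string, truncate to 18, re-parse it with wrap-around arithmetic and abs) by one fused loop that accumulates digits directly and breaks out once 18 digits are consumed, dropping the int64-wrap and abs machinery since 18 decimal digits cannot overflow.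
import Mathlib
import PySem

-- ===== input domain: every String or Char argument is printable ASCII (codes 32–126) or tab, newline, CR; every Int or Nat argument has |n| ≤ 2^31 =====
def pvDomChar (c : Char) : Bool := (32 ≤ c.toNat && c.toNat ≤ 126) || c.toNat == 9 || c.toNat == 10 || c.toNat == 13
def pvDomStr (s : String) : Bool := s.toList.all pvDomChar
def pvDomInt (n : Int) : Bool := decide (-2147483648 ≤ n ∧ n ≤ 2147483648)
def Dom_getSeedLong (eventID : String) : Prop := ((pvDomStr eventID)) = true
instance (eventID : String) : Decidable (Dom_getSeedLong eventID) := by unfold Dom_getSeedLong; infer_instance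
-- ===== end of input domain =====

-- B fuses A's build-string / truncate / parse passes into one digit-accumulating loop with an
-- 18-digit cutoff, dropping the int64-wrap and abs machinery (18 decimal digits cannot overflow).


-- ===== PORT A =====
def TWO64 : Int := 1 <<< 64
def TWO63 : Int := 1 <<< 63

def toLong (num : Int) : Int :=
  let v := PySem.Int.band num (TWO64 - 1)
  if v ≥ TWO63 then v - TWO64 else v

def longAbs (num : Int) : Int :=
  if num = -TWO63 then num
  else if num < 0 then -num else num

def I64 (string : List Char) : Int :=
  string.foldl (fun result char => toLong (toLong (result * 10) + ((char.toNat : Int) - 48))) 0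

def getSeedLong (eventID : String) : Int :=
  let subString : List Char :=
    eventID.toList.foldl (fun acc char => acc ++ PySem.Int.toChars (char.toNat : Int)) []
  let subString := if subString.length > 18 then PySem.List.slice subString none (some 18) else subString
  let parsed := I64 subString
  longAbs parsed

-- ===== PORT B =====
-- inner loop 'for d in str(ord(char))': first component 'some r' means 'return r' fired (count hit 18)
def altInner : List Char → Int → Nat → Option Int × Int × Nat
  | [], result, count => (none, result, count)
  | d :: ds, result, count =>
    let result := result * 10 + ((d.toNat : Int) - 48)
    let count := count + 1
    if count = 18 then (some result, result, count) else altInner ds result count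

def altOuter : List Char → Int → Nat → Int
  | [], result, _ => result
  | char :: rest, result, count =>
    match altInner (PySem.Int.toChars (char.toNat : Int)) result count with
    | (some res, _, _) => res
    | (none, result', count') => altOuter rest result' count'

def getSeedLong_alt (eventID : String) : Int := altOuter eventID.toList 0 0

-- ===== PRECONDITION & SPEC =====
def Spec_getSeedLong (eventID : String) (out : Int) : Prop := out = getSeedLong_alt eventID
instance (eventID : String) (out : Int) : Decidable (Spec_getSeedLong eventID out) := by unfold Spec_getSeedLong; infer_instance

-- ===== CLAIM (what is proved, stated in full; the proofs are below) =====
def Claim_equal_getSeedLong : Prop := ∀ (eventID : String), Dom_getSeedLong eventID → Spec_getSeedLong eventID (getSeedLong eventID)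

-- ===== LEMMAS AND PROOFS =====

-- the plain (wrap-free) digit fold both programs amount to
def pvF (ds : List Char) (r : Int) : Int :=
  ds.foldl (fun result d => result * 10 + ((d.toNat : Int) - 48)) r

def pvIsDig (d : Char) : Prop := 48 ≤ d.toNat ∧ d.toNat ≤ 57

-- every char that str(ord(c)) produces for a Dom char is a decimal digit
theorem digits_of_dom (n : Nat) (hn : n ≤ 126) :
    ∀ d ∈ PySem.Int.toChars (n : Int), pvIsDig d := by
  have h : (List.range 127).all
      (fun m => (PySem.Int.toChars (m : Int)).all
        (fun d => decide (48 ≤ d.toNat) && decide (d.toNat ≤ 57))) = true := by decide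
  intro d hd
  have hmem : n ∈ List.range 127 := List.mem_range.mpr (by omega)
  have h2 := List.all_eq_true.mp (List.all_eq_true.mp h n hmem) d hd
  simp only [Bool.and_eq_true, decide_eq_true_eq] at h2
  exact h2

theorem toLong_id (x : Int) (h0 : 0 ≤ x) (h1 : x < TWO63) : toLong x = x := by
  have hx : x = (x.toNat : Int) := (Int.toNat_of_nonneg h0).symm
  have hlt : x.toNat < 2 ^ 64 := by
    have h64 : TWO63 < (2:Int) ^ 64 := by decide
    omega
  have hm : TWO64 - 1 = ((2 ^ 64 - 1 : Nat) : Int) := by decide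
  have hband : PySem.Int.band x (TWO64 - 1) = x := by
    rw [hm, hx, PySem.Int.band_natCast, Nat.and_two_pow_sub_one_of_lt_two_pow hlt]
  simp [toLong, hband, not_le.mpr h1]

-- A's wrapped fold is the plain fold, and bounded, while at most 18 digits remain
theorem I64_eq_pvF (ds : List Char) (hdig : ∀ d ∈ ds, pvIsDig d) (hlen : ds.length ≤ 18) :
    ∀ r : Int, 0 ≤ r → r < 10 ^ (18 - ds.length) →
      ds.foldl (fun result char => toLong (toLong (result * 10) + ((char.toNat : Int) - 48))) r
        = pvF ds r ∧ 0 ≤ pvF ds r ∧ pvF ds r < 10 ^ 18 := by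
  induction ds with
  | nil =>
    intro r h0 h1
    refine ⟨rfl, h0, ?_⟩
    simpa using h1
  | cons d t ih =>
    intro r h0 h1
    obtain ⟨hd1, hd2⟩ := hdig d List.mem_cons_self
    simp only [List.length_cons] at hlen h1
    have hpow : (10:Int) ^ (18 - (t.length + 1)) * 10 ≤ 10 ^ (18 - t.length) := by
      have he : 18 - (t.length + 1) + 1 = 18 - t.length := by omega
      rw [← he, pow_succ]
    have hdval : (0:Int) ≤ (d.toNat : Int) - 48 ∧ (d.toNat : Int) - 48 ≤ 9 := by omega
    have hr' : 0 ≤ r * 10 + ((d.toNat : Int) - 48) ∧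
        r * 10 + ((d.toNat : Int) - 48) < 10 ^ (18 - t.length) := by
      constructor
      · nlinarith [hdval.1]
      · have hr1 : r ≤ 10 ^ (18 - (t.length + 1)) - 1 := by omega
        nlinarith [hdval.2, hpow]
    have hbound63 : (10:Int) ^ (18 - t.length) ≤ TWO63 := by
      have h18 : (10:Int) ^ (18 - t.length) ≤ 10 ^ 18 :=
        pow_le_pow_right₀ (by norm_num) (by omega)
      have h63 : (10:Int) ^ 18 < TWO63 := by decide
      omega
    have e1 : toLong (r * 10) = r * 10 :=
      toLong_id _ (by nlinarith) (by nlinarith [hdval.1, hr'.2])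
    have e2 : toLong (r * 10 + ((d.toNat : Int) - 48)) = r * 10 + ((d.toNat : Int) - 48) :=
      toLong_id _ hr'.1 (by omega)
    have hrec := ih (fun x hx => hdig x (List.mem_cons_of_mem _ hx)) (by omega)
      (r * 10 + ((d.toNat : Int) - 48)) hr'.1 hr'.2
    simpa [pvF, List.foldl_cons, e1, e2] using hrec

-- B's inner loop, while the budget is not hit: a plain fold with an advanced counter
theorem altInner_under (ds : List Char) :
    ∀ r cnt, cnt + ds.length < 18 → altInner ds r cnt = (none, pvF ds r, cnt + ds.length) := by
  induction ds with
  | nil => intro r cnt _; simp [altInner, pvF]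
  | cons d t ih =>
    intro r cnt h
    simp only [List.length_cons] at h
    have hcnt : ¬ (cnt + 1 = 18) := by omega
    have hrec := ih (r * 10 + ((d.toNat : Int) - 48)) (cnt + 1) (by omega)
    simp only [altInner, hcnt, if_false, hrec, pvF, List.foldl_cons, List.length_cons,
      Prod.mk.injEq]
    exact ⟨trivial, trivial, by omega⟩

-- B's inner loop, when the budget is hit mid-token: the fold of the first 18-cnt digits
theorem altInner_over (ds : List Char) :
    ∀ r cnt, cnt < 18 → 18 ≤ cnt + ds.length →
      (altInner ds r cnt).1 = some (pvF (ds.take (18 - cnt)) r) := by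
  induction ds with
  | nil => intro r cnt h1 h2; simp at h2; omega
  | cons d t ih =>
    intro r cnt h1 h2
    simp only [List.length_cons] at h2
    by_cases hc : cnt + 1 = 18
    · have h18 : 18 - cnt = 1 := by omega
      simp [altInner, hc, h18, pvF]
    · have htake : (d :: t).take (18 - cnt) = d :: t.take (18 - (cnt + 1)) := by
        have he : 18 - cnt = (18 - (cnt + 1)) + 1 := by omega
        simp [he]
      rw [htake]
      simp only [altInner, hc, if_false, pvF, List.foldl_cons]
      exact ih _ (cnt + 1) (by omega) (by omega)

-- B's outer loop computes the plain fold of the first 18-cnt chars of the concatenated digits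
theorem altOuter_eq (cs : List Char) :
    ∀ r cnt, cnt < 18 →
      altOuter cs r cnt
        = pvF ((cs.flatMap (fun c => PySem.Int.toChars (c.toNat : Int))).take (18 - cnt)) r := by
  induction cs with
  | nil => intro r cnt _; simp [altOuter, pvF]
  | cons c t ih =>
    intro r cnt hcnt
    by_cases h : cnt + (PySem.Int.toChars (c.toNat : Int)).length < 18
    · have hinner := altInner_under (PySem.Int.toChars (c.toNat : Int)) r cnt h
      have htake : ((PySem.Int.toChars (c.toNat : Int)
            ++ t.flatMap (fun c => PySem.Int.toChars (c.toNat : Int))).take (18 - cnt))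
          = PySem.Int.toChars (c.toNat : Int)
            ++ (t.flatMap (fun c => PySem.Int.toChars (c.toNat : Int))).take
                (18 - (cnt + (PySem.Int.toChars (c.toNat : Int)).length)) := by
        rw [List.take_append, List.take_of_length_le (by omega)]
        have he : 18 - cnt - (PySem.Int.toChars (c.toNat : Int)).length
            = 18 - (cnt + (PySem.Int.toChars (c.toNat : Int)).length) := by omega
        rw [he]
      simp only [altOuter, hinner, List.flatMap_cons, htake]
      rw [ih _ _ (by omega)]
      simp [pvF, List.foldl_append]
    · have hinner := altInner_over (PySem.Int.toChars (c.toNat : Int)) r cnt hcnt (by omega)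
      have htake : ((PySem.Int.toChars (c.toNat : Int)
            ++ t.flatMap (fun c => PySem.Int.toChars (c.toNat : Int))).take (18 - cnt))
          = (PySem.Int.toChars (c.toNat : Int)).take (18 - cnt) := by
        rw [List.take_append]
        have h0 : 18 - cnt - (PySem.Int.toChars (c.toNat : Int)).length = 0 := by omega
        simp [h0]
      simp only [altOuter, List.flatMap_cons, htake]
      rcases he : altInner (PySem.Int.toChars (c.toNat : Int)) r cnt with ⟨o, r', cnt'⟩
      rw [he] at hinner
      simp only at hinner
      simp [hinner]

-- ===== VERDICT (by name: the statement is the Claim_ definition above) =====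
theorem getSeedLong_spec : Claim_equal_getSeedLong := by
  intro eventID hdom
  unfold Spec_getSeedLong getSeedLong getSeedLong_alt
  set D := eventID.toList.flatMap (fun c => PySem.Int.toChars (c.toNat : Int)) with hD
  have hfold : eventID.toList.foldl (fun acc char => acc ++ PySem.Int.toChars (char.toNat : Int)) []
      = D := by
    simpa using PySem.List.foldl_append_eq_flatMap
      (l := eventID.toList) (g := fun c => PySem.Int.toChars (c.toNat : Int)) (acc := [])
  have hdig : ∀ d ∈ D.take 18, pvIsDig d := by
    intro d hd
    have hd' : d ∈ D := List.mem_of_mem_take hd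
    rw [hD] at hd'
    obtain ⟨c, hc, hdc⟩ := List.mem_flatMap.mp hd'
    have hcdom : pvDomChar c = true := (List.all_eq_true.mp hdom) c hc
    have hle : c.toNat ≤ 126 := by
      simp [pvDomChar] at hcdom
      omega
    exact digits_of_dom c.toNat hle d hdc
  have hsub : (if D.length > 18 then PySem.List.slice D none (some 18) else D) = D.take 18 := by
    split_ifs with h
    · have he : ((18:Nat):Int) = (18:Int) := by norm_num
      rw [← he, PySem.List.slice_to_natCast]
    · rw [List.take_of_length_le (by omega)]
  have hlen : (D.take 18).length ≤ 18 := by simp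
  have hmain := I64_eq_pvF (D.take 18) hdig hlen 0 le_rfl (by positivity)
  rw [altOuter_eq eventID.toList 0 0 (by omega)]
  simp only [hfold, hsub]
  unfold I64
  rw [hmain.1]
  have hnn := hmain.2.1
  unfold longAbs
  have h63 : -TWO63 < 0 := by decide
  rw [if_neg (by omega), if_neg (by omega)]
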